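-- pv_equiv track=rewrite | github.com/fypp/leetCode | python/problem/median/solution.py | get_poped_result
-- ===== SOURCE A (Python) =====
-- def get_poped_result(result, s_list, sep):
--     ix_init = list(range(0, len(s_list), sep))
--     pop_ix = [0]
--     for v in ix_init[1:]:
--         pop_ix.append(v - 1)
--         pop_ix.append(v)
--     if sep + pop_ix[-1] == len(s_list):
--         pop_ix.append(len(s_list) - 1)
--     for i, v in enumerate(pop_ix):
--         result.append(s_list.pop(v - i))
--     return result
-- ===== SOURCE B (Python) =====
-- def get_poped_result(result, s_list, sep):
--     n = len(s_list)
--     bounds = list(range(0, n, sep))[1:]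
--     take = {0}
--     for v in bounds:
--         take.add(v - 1)
--         take.add(v)
--     if sep + (bounds[-1] if bounds else 0) == n:
--         take.add(n - 1)
--     picked, kept = [], []
--     for i, x in enumerate(s_list):
--         (picked if i in take else kept).append(x)
--     result += picked
--     s_list[:] = kept
--     return result
-- ===== Notes on version B (the rewrite author's own statement) =====
-- stated objective: alternative
-- what changed: A repeatedly calls s_list.pop at shifting indices, interleaving selection with mutation; B computes the picked index set once and gathers picked/kept elements in a single partition pass over s_list, with no pops and no index adjustment.
import Mathlib
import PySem

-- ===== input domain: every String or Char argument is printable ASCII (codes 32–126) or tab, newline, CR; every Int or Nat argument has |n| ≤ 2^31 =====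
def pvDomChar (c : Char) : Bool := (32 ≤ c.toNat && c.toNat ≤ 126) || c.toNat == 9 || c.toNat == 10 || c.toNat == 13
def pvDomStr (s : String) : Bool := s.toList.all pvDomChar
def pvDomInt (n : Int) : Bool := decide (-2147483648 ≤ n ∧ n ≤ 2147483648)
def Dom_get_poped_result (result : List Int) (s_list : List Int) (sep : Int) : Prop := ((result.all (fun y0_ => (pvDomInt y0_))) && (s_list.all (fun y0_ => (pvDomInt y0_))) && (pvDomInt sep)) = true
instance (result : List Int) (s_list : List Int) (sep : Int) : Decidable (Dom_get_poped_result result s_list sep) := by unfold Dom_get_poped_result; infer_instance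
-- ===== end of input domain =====

-- B replaces A's repeated s_list.pop calls at shifting indices with one partition pass over
-- s_list after computing the picked index set once; both versions mutate result/s_list in
-- place in Python, and the equivalence proved here is about the return value.

-- ===== PORT A =====
-- the loop 'for i, v in enumerate(pop_ix): result.append(s_list.pop(v - i))';
-- none = the IndexError Python raises when a pop index is out of range
def aLoop (res : List Int) (lst : List Int) (ixs : List Int) (i : Int) : Option (List Int) :=
  match ixs with
  | [] => some res
  | v :: rest =>
    match PySem.List.pop? lst (v - i) with
    | none => none
    | some (x, lst') => aLoop (res ++ [x]) lst' rest (i + 1)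

def get_poped_result (result : List Int) (s_list : List Int) (sep : Int) : List Int :=
  let n : Int := s_list.length
  let ix_init := PySem.List.pyRange 0 n sep
  let pop_ix := (PySem.List.slice ix_init (some 1) none).foldl (fun acc v => acc ++ [v - 1, v]) [0]
  -- pop_ix[-1]: pop_ix starts from [0] so it is never empty; the default 0 is never used
  let pop_ix := if sep + PySem.List.pyGetD pop_ix (-1) 0 = n then pop_ix ++ [n - 1] else pop_ix
  (aLoop result s_list pop_ix 0).getD []

-- ===== PORT B =====
-- the loop 'for i, x in enumerate(s_list): (picked if i in take else kept).append(x)'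
def bLoop (take : PySem.Set Int) (i : Int) (lst : List Int) (picked : List Int) (kept : List Int) :
    List Int × List Int :=
  match lst with
  | [] => (picked, kept)
  | x :: xs =>
    if take.contains i then bLoop take (i + 1) xs (picked ++ [x]) kept
    else bLoop take (i + 1) xs picked (kept ++ [x])

def get_poped_result_alt (result : List Int) (s_list : List Int) (sep : Int) : List Int :=
  let n : Int := s_list.length
  let bounds := PySem.List.slice (PySem.List.pyRange 0 n sep) (some 1) none
  let take := bounds.foldl (fun s v => (PySem.Set.add s (v - 1)).add v) (PySem.Set.ofList [(0 : Int)])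
  let take := if sep + (if bounds.isEmpty then 0 else PySem.List.pyGetD bounds (-1) 0) = n
              then take.add (n - 1) else take
  let pk := bLoop take 0 s_list [] []
  result ++ pk.1

-- ===== PRECONDITION & SPEC =====
-- Pre_ excludes exactly the inputs on which the Python A raises: sep = 0 (ValueError from range),
-- empty s_list and sep = 1 (IndexError: the pop indices run off the shrinking list).
def Pre_get_poped_result (result : List Int) (s_list : List Int) (sep : Int) : Prop :=
  s_list ≠ [] ∧ (2 ≤ sep ∨ sep < 0)
instance (result : List Int) (s_list : List Int) (sep : Int) : Decidable (Pre_get_poped_result result s_list sep) := by unfold Pre_get_poped_result; infer_instance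

def pvWitness_get_poped_result : List Int × List Int × Int := ([7], [10, 11, 12, 13, 14], 3)

def Spec_get_poped_result (result : List Int) (s_list : List Int) (sep : Int) (out : List Int) : Prop := out = get_poped_result_alt result s_list sep
instance (result : List Int) (s_list : List Int) (sep : Int) (out : List Int) : Decidable (Spec_get_poped_result result s_list sep out) := by unfold Spec_get_poped_result; infer_instance

-- ===== CLAIM (what is proved, stated in full; the proofs are below) =====
def Claim_equal_get_poped_result : Prop := ∀ (result : List Int) (s_list : List Int) (sep : Int), Dom_get_poped_result result s_list sep → Pre_get_poped_result result s_list sep → Spec_get_poped_result result s_list sep (get_poped_result result s_list sep)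

-- ===== LEMMAS AND PROOFS =====

-- shifting a nonnegative Python index one step into the tail
lemma pyGetD_cons_shift (x : Int) (xs : List Int) (j d : Int) (h : 1 ≤ j) :
    PySem.List.pyGetD (x :: xs) j d = PySem.List.pyGetD xs (j - 1) d := by
  have h1 : j = ((j - 1).toNat + 1 : Nat) := by omega
  have h2 : j - 1 = (((j - 1).toNat : Nat) : Int) := by omega
  rw [h2, PySem.List.pyGetD_natCast]
  rw [h1, PySem.List.pyGetD_natCast, List.getD_cons_succ]
  congr 1
  omega

-- membership in the set built by the add-pairs fold
lemma mem_addPairs (B : List Int) (s : PySem.Set Int) (x : Int) :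
    x ∈ B.foldl (fun s v => (PySem.Set.add s (v - 1)).add v) s ↔
      x ∈ s ∨ x ∈ B.flatMap (fun v => [v - 1, v]) := by
  induction B generalizing s with
  | nil => simp
  | cons v rest ih =>
    simp only [List.foldl_cons, List.flatMap_cons, ih, PySem.Set.mem_add, List.mem_append]
    simp only [List.mem_cons, List.mem_singleton]
    tauto

-- the last element of the pop-index list before the optional tail append
lemma getLast?_flatPairs (B : List Int) :
    (0 :: B.flatMap (fun v => [v - 1, v])).getLast? = some (B.getLast?.getD 0) := by
  induction B using List.reverseRecOn with
  | nil => simp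
  | append_singleton ys v _ =>
    rw [List.flatMap_append]
    simp only [List.flatMap_cons, List.flatMap_nil, List.append_nil]
    have h : (0 : Int) :: (ys.flatMap (fun v => [v - 1, v]) ++ [v - 1, v])
        = ((0 :: ys.flatMap (fun v => [v - 1, v]) ++ [v - 1]) ++ [v]) := by simp
    rw [h, List.getLast?_concat, List.getLast?_concat]
    simp

-- strict increase of the pop-index list
lemma pairwise_flatPairs (B : List Int) (hp : B.Pairwise (fun x y => x + 2 ≤ y))
    (hlb : ∀ v ∈ B, 2 ≤ v) :
    (0 :: B.flatMap (fun v => [v - 1, v])).Pairwise (· < ·) := by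
  induction B with
  | nil => simp
  | cons v rest ih =>
    rcases List.pairwise_cons.mp hp with ⟨hv, hrest⟩
    have h2 : 2 ≤ v := hlb v (by simp)
    have ihr := ih hrest (fun w hw => hlb w (by simp [hw]))
    rcases List.pairwise_cons.mp ihr with ⟨h0, htail⟩
    have hT : ∀ w ∈ rest.flatMap (fun v => [v - 1, v]), v < w := by
      intro w hw
      simp only [List.mem_flatMap, List.mem_cons, List.not_mem_nil, or_false] at hw
      rcases hw with ⟨u, hu, h | h⟩ <;> have := hv u hu <;> omega
    simp only [List.flatMap_cons, List.cons_append, List.nil_append]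
    refine List.Pairwise.cons ?_ (List.Pairwise.cons ?_ (List.Pairwise.cons hT htail))
    · intro w hw
      simp only [List.mem_cons] at hw
      rcases hw with rfl | rfl | hw
      · omega
      · omega
      · have := hT w hw; omega
    · intro w hw
      rcases List.mem_cons.mp hw with rfl | hw
      · omega
      · have := hT w hw; omega

-- A's pop loop on strictly increasing in-range indices gathers the original elements
lemma aLoop_eq (ixs : List Int) : ∀ (res lst : List Int) (i : Int),
    ixs.Pairwise (· < ·) → (∀ v ∈ ixs, i ≤ v ∧ v - i < (lst.length : Int)) →
    aLoop res lst ixs i = some (res ++ ixs.map (fun v => PySem.List.pyGetD lst (v - i) 0)) := by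
  induction ixs with
  | nil => intro res lst i _ _; simp [aLoop]
  | cons v rest ih =>
    intro res lst i hp hb
    rcases hb v (by simp) with ⟨hge, hlt⟩
    have hk : (v - i).toNat < lst.length := by omega
    have hcast : v - i = ((v - i).toNat : Nat) := by omega
    have hpop : PySem.List.pop? lst (v - i) = some (lst[(v - i).toNat], lst.eraseIdx (v - i).toNat) := by
      have := PySem.List.pop?_natCast lst (v - i).toNat hk
      rwa [← hcast] at this
    rw [aLoop, hpop]
    dsimp only
    rcases List.pairwise_cons.mp hp with ⟨hv, hrest⟩
    have hb' : ∀ w ∈ rest, i + 1 ≤ w ∧ w - (i + 1) < ((lst.eraseIdx (v - i).toNat).length : Int) := by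
      intro w hw
      rcases hb w (by simp [hw]) with ⟨_, hw2⟩
      have := hv w hw
      have : (lst.eraseIdx (v - i).toNat).length = lst.length - 1 := by
        rw [List.length_eraseIdx]; simp [hk]
      omega
    rw [ih (res ++ [lst[(v - i).toNat]]) _ (i + 1) hrest hb']
    have hhead : PySem.List.pyGetD lst (v - i) 0 = lst[(v - i).toNat] := by
      rw [PySem.List.pyGetD_eq_getElem lst 0 (by omega) (by omega)]
    have htail : rest.map (fun w => PySem.List.pyGetD (lst.eraseIdx (v - i).toNat) (w - (i + 1)) 0)
        = rest.map (fun w => PySem.List.pyGetD lst (w - i) 0) := by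
      apply List.map_congr_left
      intro w hw
      have hvw := hv w hw
      rcases hb w (by simp [hw]) with ⟨_, hw2⟩
      have hq : (w - (i + 1)).toNat < (lst.eraseIdx (v - i).toNat).length := by
        rw [List.length_eraseIdx]; simp [hk]; omega
      have hql : (w - i).toNat < lst.length := by omega
      rw [PySem.List.pyGetD_eq_getElem _ 0 (by omega) (by omega),
          PySem.List.pyGetD_eq_getElem _ 0 (by omega) (by omega),
          List.getElem_eraseIdx]
      have hge' : ¬ ((w - (i + 1)).toNat < (v - i).toNat) := by omega
      simp only [hge', dite_false]
      congr 1
      omega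
    simp only [List.map_cons]
    rw [hhead, htail]
    simp

-- B's partition loop picks exactly the elements at the strictly increasing index list
lemma bLoop_eq (lst : List Int) : ∀ (take : PySem.Set Int) (i : Int) (ixs picked kept : List Int),
    ixs.Pairwise (· < ·) → (∀ v ∈ ixs, i ≤ v ∧ v - i < (lst.length : Int)) →
    (∀ x : Int, i ≤ x → (take.contains x = true ↔ x ∈ ixs)) →
    (bLoop take i lst picked kept).1 = picked ++ ixs.map (fun v => PySem.List.pyGetD lst (v - i) 0) := by
  induction lst with
  | nil =>
    intro take i ixs picked kept _ hb _
    have : ixs = [] := by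
      cases ixs with
      | nil => rfl
      | cons v rest => rcases hb v (by simp) with ⟨h1, h2⟩; simp at h2; omega
    simp [bLoop, this]
  | cons x xs ih =>
    intro take i ixs picked kept hp hb htake
    rw [bLoop]
    by_cases hc : take.contains i = true
    · have hi : i ∈ ixs := (htake i le_rfl).mp hc
      -- the head of ixs is i
      obtain ⟨v, rest, rfl⟩ : ∃ v rest, ixs = v :: rest := by
        cases ixs with
        | nil => simp at hi
        | cons v rest => exact ⟨v, rest, rfl⟩
      rcases List.pairwise_cons.mp hp with ⟨hv, hrest⟩
      have hvi : v = i := by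
        rcases List.mem_cons.mp hi with h | h
        · omega
        · have := hv i h; have := (hb v (by simp)).1; omega
      subst hvi
      simp only [hc, if_true]
      rw [ih take (v + 1) rest (picked ++ [x]) kept hrest ?_ ?_]
      · have hhead : PySem.List.pyGetD (x :: xs) (v - v) 0 = x := by
          simp [PySem.List.pyGetD_zero_cons]
        have htl : rest.map (fun w => PySem.List.pyGetD xs (w - (v + 1)) 0)
            = rest.map (fun w => PySem.List.pyGetD (x :: xs) (w - v) 0) := by
          apply List.map_congr_left
          intro w hw
          have := hv w hw
          rw [pyGetD_cons_shift x xs (w - v) 0 (by omega)]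
          congr 1; omega
        simp only [List.map_cons, hhead, htl]
        simp
      · intro w hw
        have := hv w hw
        rcases hb w (by simp [hw]) with ⟨_, h2⟩
        simp at h2 ⊢
        omega
      · intro y hy
        rw [htake y (by omega)]
        simp only [List.mem_cons]
        constructor
        · rintro (h | h)
          · omega
          · exact h
        · intro h; right; exact h
    · have hi : i ∉ ixs := fun h => hc ((htake i le_rfl).mpr h)
      simp only [hc, Bool.false_eq_true, if_false]
      rw [ih take (i + 1) ixs picked (kept ++ [x]) hp ?_ ?_]
      · congr 1
        apply List.map_congr_left
        intro w hw
        have h1 : i ≤ w := (hb w hw).1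
        have hne : w ≠ i := fun h => hi (h ▸ hw)
        rw [pyGetD_cons_shift x xs (w - i) 0 (by omega)]
        congr 1; omega
      · intro w hw
        rcases hb w hw with ⟨h1, h2⟩
        have hne : w ≠ i := fun h => hi (h ▸ hw)
        simp at h2 ⊢
        omega
      · intro y hy
        exact htake y (by omega)

-- facts about bounds = list(range(0, n, sep))[1:] under Pre_
lemma bounds_facts (n sep : Int) (hn : 1 ≤ n) (hsep : 2 ≤ sep ∨ sep < 0) :
    ((PySem.List.pyRange 0 n sep).drop 1).Pairwise (fun x y => x + 2 ≤ y) ∧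
    (∀ v ∈ (PySem.List.pyRange 0 n sep).drop 1, 2 ≤ v ∧ v < n) ∧
    (2 ≤ sep ∨ (PySem.List.pyRange 0 n sep).drop 1 = []) := by
  rcases hsep with hsep | hsep
  · have hr := PySem.List.pyRange_of_pos 0 n (by omega : (0:Int) < sep)
    have hlt : (0:Int) < n := by omega
    refine ⟨?_, ?_, Or.inl hsep⟩
    · rw [hr, List.pairwise_iff_getElem]
      intro i j hi hj hij
      simp only [List.getElem_drop, List.getElem_map, List.getElem_range]
      have h1 : ((1 + i : Nat) : Int) + 1 ≤ ((1 + j : Nat) : Int) := by push_cast; omega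
      have h2 : sep * (((1 + i : Nat) : Int) + 1) ≤ sep * ((1 + j : Nat) : Int) :=
        mul_le_mul_of_nonneg_left h1 (by omega)
      nlinarith
    · intro v hv
      have hv' : v ∈ PySem.List.pyRange 0 n sep := List.mem_of_mem_drop hv
      have hub := ((PySem.List.mem_pyRange_iff_of_pos (by omega : (0:Int) < sep) v).mp hv').2.1
      rw [hr, ← List.map_drop] at hv
      rcases List.mem_map.mp hv with ⟨k, hk, rfl⟩
      have h1k : 1 ≤ k := by
        rcases List.mem_iff_getElem.mp hk with ⟨j, hj, hjk⟩
        simp only [List.getElem_drop, List.getElem_range] at hjk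
        omega
      refine ⟨?_, hub⟩
      have hm : sep * 1 ≤ sep * (k : Int) :=
        mul_le_mul_of_nonneg_left (by exact_mod_cast h1k) (by omega)
      rw [mul_one] at hm
      omega
  · have : PySem.List.pyRange 0 n sep = [] := by
      unfold PySem.List.pyRange
      have h1 : ¬ (sep = 0) := by omega
      have h2 : ¬ ((0:Int) < sep) := by omega
      have h3 : ¬ (n < (0:Int)) := by omega
      simp [h1, h2, h3]
    rw [this]
    simp

-- the two loop results agree once the index list / index set line up
lemma assemble (s_list result : List Int) (L : List Int) (T : PySem.Set Int)
    (hp : L.Pairwise (· < ·)) (hb : ∀ v ∈ L, 0 ≤ v ∧ v < (s_list.length : Int))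
    (ht : ∀ x : Int, T.contains x = true ↔ x ∈ L) :
    (aLoop result s_list L 0).getD [] = result ++ (bLoop T 0 s_list [] []).1 := by
  rw [aLoop_eq L result s_list 0 hp
      (fun v hv => ⟨by have := (hb v hv).1; omega, by have := (hb v hv).2; omega⟩)]
  rw [bLoop_eq s_list T 0 L [] [] hp
      (fun v hv => ⟨by have := (hb v hv).1; omega, by have := (hb v hv).2; omega⟩)
      (fun x _ => ht x)]
  simp

-- ===== VERDICT (by name: the statement is the Claim_ definition above) =====
theorem get_poped_result_spec : Claim_equal_get_poped_result := by
  intro result s_list sep _ hpre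
  rcases hpre with ⟨hne, hsep⟩
  have hn : 1 ≤ (s_list.length : Int) := by
    have := List.length_pos_of_ne_nil hne
    omega
  obtain ⟨hBpair, hBmem, hBsep⟩ := bounds_facts (s_list.length : Int) sep hn hsep
  unfold Spec_get_poped_result get_poped_result get_poped_result_alt
  dsimp only
  rw [PySem.List.slice_from _ (by omega : (0:Int) ≤ 1)]
  rw [PySem.List.foldl_append_eq_flatMap]
  simp only [Int.toNat_one, List.singleton_append]
  set n : Int := (s_list.length : Int) with hndef
  set B : List Int := (PySem.List.pyRange 0 n sep).drop 1 with hBdef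
  set g : Int → List Int := fun v => [v - 1, v] with hgdef
  set gl : Int := B.getLast?.getD 0 with hgldef
  -- both tail conditions read the same value
  have hglA : PySem.List.pyGetD (0 :: B.flatMap g) (-1) 0 = gl := by
    rw [PySem.List.pyGetD_neg_one _ _ (by simp)]
    have h2 := getLast?_flatPairs B
    rw [List.getLast?_eq_some_getLast (l := 0 :: B.flatMap g) (by simp)] at h2
    exact Option.some.inj h2
  have hglB : (if B.isEmpty then 0 else PySem.List.pyGetD B (-1) 0) = gl := by
    rw [hgldef]
    cases hB' : B with
    | nil => simp
    | cons b bs =>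
      simp only [List.isEmpty_cons, Bool.false_eq_true, if_false]
      rw [PySem.List.pyGetD_neg_one _ _ (List.cons_ne_nil b bs),
          List.getLast?_eq_some_getLast (List.cons_ne_nil b bs)]
      simp
  rw [hglA, hglB]
  -- shared facts about the pop-index list
  have hpw0 : (0 :: B.flatMap g).Pairwise (· < ·) :=
    pairwise_flatPairs B hBpair (fun v hv => (hBmem v hv).1)
  have hmem0 : ∀ v ∈ (0 :: B.flatMap g), 0 ≤ v ∧ v < n := by
    intro v hv
    rcases List.mem_cons.mp hv with rfl | hv
    · exact ⟨le_rfl, by omega⟩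
    · simp only [hgdef, List.mem_flatMap, List.mem_cons, List.not_mem_nil, or_false] at hv
      obtain ⟨u, hu, hvu⟩ := hv
      rcases hBmem u hu with ⟨h1, h2⟩
      rcases hvu with rfl | rfl <;> omega
  by_cases hc : sep + gl = n
  · rw [if_pos hc, if_pos hc]
    -- every pre-tail index is < n - 1
    have hlt : ∀ x ∈ (0 :: B.flatMap g), x < n - 1 := by
      cases hB : B with
      | nil =>
        intro x hx
        rw [hB] at hgldef
        simp only [hgdef, List.flatMap_nil, List.mem_singleton] at hx
        subst hx
        simp at hgldef
        rcases hsep with h | h <;> omega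
      | cons b bs =>
        have hs2 : 2 ≤ sep := by
          rcases hBsep with h | h
          · exact h
          · rw [h] at hB; cases hB
        have hgl_lt : gl < n - 1 := by omega
        intro x hx
        rw [← hB] at hx
        have hne0 : (0 : Int) :: B.flatMap g ≠ [] := by simp
        have hdecomp := List.dropLast_concat_getLast hne0
        have hglval : (0 :: B.flatMap g).getLast hne0 = gl := by
          have h2 := getLast?_flatPairs B
          rw [List.getLast?_eq_some_getLast hne0] at h2
          exact Option.some.inj h2
        have hpw' := hpw0
        rw [← hdecomp] at hpw' hx
        rcases List.pairwise_append.mp hpw' with ⟨_, _, hcross⟩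
        rcases List.mem_append.mp hx with hx | hx
        · have := hcross x hx _ (List.mem_singleton.mpr rfl)
          omega
        · rw [List.mem_singleton.mp hx, hglval]
          exact hgl_lt
    apply assemble
    · rw [List.pairwise_append]
      exact ⟨hpw0, by simp, by intro a ha b hb; rw [List.mem_singleton.mp hb]; exact hlt a ha⟩
    · intro v hv
      rcases List.mem_append.mp hv with hv | hv
      · exact hmem0 v hv
      · rw [List.mem_singleton.mp hv]; omega
    · intro x
      rw [PySem.Set.contains_iff, PySem.Set.mem_add, mem_addPairs]
      simp only [PySem.Set.mem_ofList, List.mem_append, List.mem_cons]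
      tauto
  · rw [if_neg hc, if_neg hc]
    apply assemble
    · exact hpw0
    · exact hmem0
    · intro x
      rw [PySem.Set.contains_iff, mem_addPairs]
      simp only [PySem.Set.mem_ofList, List.mem_cons]
      tauto
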